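-- pv_equiv track=rewrite | github.com/mothy900/poke-bulk | scripts/build_pogo_subset.py | parse_id_block
-- ===== SOURCE A (Python) =====
-- from typing import Optional, Dict, Any, List, Tuple
--
-- def parse_id_block(block: str) -> List[int]:
--     ids = set()
--     for line in block.strip().splitlines():
--         s = line.strip()
--         if not s:
--             continue
--         if "-" in s:
--             a, b = s.split("-", 1)
--             a = int(a.strip())
--             b = int(b.strip())
--             lo, hi = (a, b) if a <= b else (b, a)
--             for n in range(lo, hi + 1):
--                 ids.add(n)
--         else:
--             ids.add(int(s))
--     return sorted(ids)
-- ===== SOURCE B (Python) =====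
-- from typing import List
--
-- def parse_id_block(block: str) -> List[int]:
--     # collect one (lo, hi) interval per non-empty line, then sort by start,
--     # merge overlapping/adjacent intervals in one pass, and expand the merged
--     # intervals in order: the output is already sorted and duplicate-free.
--     intervals = []
--     for line in block.strip().splitlines():
--         s = line.strip()
--         if not s:
--             continue
--         if "-" in s:
--             a, b = s.split("-", 1)
--             a = int(a.strip())
--             b = int(b.strip())
--             intervals.append((a, b) if a <= b else (b, a))
--         else:
--             n = int(s)
--             intervals.append((n, n))
--     intervals.sort(key=lambda iv: iv[0])
--     out = []
--     cur = None
--     for lo, hi in intervals: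
--         if cur is None:
--             cur = (lo, hi)
--         elif lo <= cur[1] + 1:
--             if hi > cur[1]:
--                 cur = (cur[0], hi)
--         else:
--             out.extend(range(cur[0], cur[1] + 1))
--             cur = (lo, hi)
--     if cur is not None:
--         out.extend(range(cur[0], cur[1] + 1))
--     return out
-- ===== Notes on version B (the rewrite author's own statement) =====
-- stated objective: alternative
-- what changed: A inserts every id of every range into a set and sorts the elements; B parses each line into a (lo,hi) interval, sorts the intervals by start, merges overlapping or adjacent intervals in one linear pass, and expands the merged intervals in order, producing the sorted duplicate-free list directly without any set or element-level sort.
import Mathlib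
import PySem

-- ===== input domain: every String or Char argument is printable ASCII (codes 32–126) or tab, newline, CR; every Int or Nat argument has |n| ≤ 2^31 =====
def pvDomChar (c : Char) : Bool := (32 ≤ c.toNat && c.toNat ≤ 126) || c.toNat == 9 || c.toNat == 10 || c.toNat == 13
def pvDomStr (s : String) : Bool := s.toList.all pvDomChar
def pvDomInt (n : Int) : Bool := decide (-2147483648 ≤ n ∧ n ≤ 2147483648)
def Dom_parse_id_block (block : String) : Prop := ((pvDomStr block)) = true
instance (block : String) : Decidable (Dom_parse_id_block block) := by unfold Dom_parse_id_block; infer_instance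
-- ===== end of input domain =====

-- B replaces A's element set + element sort by sorting per-line (lo,hi) intervals, merging
-- overlapping/adjacent ones in one pass and expanding them in order (alternative algorithm).

-- ===== PORT A =====
-- A: add every id of every line/range to a set, return sorted(set).
-- int(...) is PySem.Int.ofChars?; `.getD 0` is only reached where Python raises ValueError (excluded by Pre_).
def parse_id_block (block : String) : List Int :=
  let ids : PySem.Set Int :=
    (PySem.Chars.splitlines (PySem.Chars.strip block.toList)).foldl (fun ids line =>
      let s := PySem.Chars.strip line
      if s = [] then ids
      else if PySem.Chars.isIn ['-'] s then
        let a := (PySem.Int.ofChars? (PySem.Chars.strip ((PySem.Chars.splitOnMax s ['-'] 1).getD 0 []))).getD 0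
        let b := (PySem.Int.ofChars? (PySem.Chars.strip ((PySem.Chars.splitOnMax s ['-'] 1).getD 1 []))).getD 0
        let lo := if a ≤ b then a else b
        let hi := if a ≤ b then b else a
        (PySem.List.pyRange lo (hi + 1) 1).foldl PySem.Set.add ids
      else
        PySem.Set.add ids ((PySem.Int.ofChars? s).getD 0))
      PySem.Set.empty
  PySem.List.sorted ids (fun x => x) false

-- ===== PORT B =====
-- B: collect one (lo,hi) interval per non-empty line, sort by start, merge
-- overlapping/adjacent intervals (state = output so far × current interval), expand in order.
def parse_id_block_alt (block : String) : List Int :=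
  let intervals : List (Int × Int) :=
    (PySem.Chars.splitlines (PySem.Chars.strip block.toList)).foldl (fun acc line =>
      let s := PySem.Chars.strip line
      if s = [] then acc
      else if PySem.Chars.isIn ['-'] s then
        let a := (PySem.Int.ofChars? (PySem.Chars.strip ((PySem.Chars.splitOnMax s ['-'] 1).getD 0 []))).getD 0
        let b := (PySem.Int.ofChars? (PySem.Chars.strip ((PySem.Chars.splitOnMax s ['-'] 1).getD 1 []))).getD 0
        acc ++ [if a ≤ b then (a, b) else (b, a)]
      else
        acc ++ [((PySem.Int.ofChars? s).getD 0, (PySem.Int.ofChars? s).getD 0)]) []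
  let sortedIvs := PySem.List.sorted intervals (fun iv => iv.1) false
  let st := sortedIvs.foldl (fun st iv =>
      match st.2 with
      | none => (st.1, some iv)
      | some cur =>
        if iv.1 ≤ cur.2 + 1 then
          (st.1, some (if cur.2 < iv.2 then (cur.1, iv.2) else cur))
        else
          (st.1 ++ PySem.List.pyRange cur.1 (cur.2 + 1) 1, some iv))
    (([] : List Int), (none : Option (Int × Int)))
  match st.2 with
  | none => st.1
  | some cur => st.1 ++ PySem.List.pyRange cur.1 (cur.2 + 1) 1

-- ===== PRECONDITION & SPEC =====
-- Pre_ excludes exactly the inputs where Python A raises ValueError: a non-empty stripped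
-- line whose int() parse fails (the single id, or either side of the first '-').
def Pre_parse_id_block (block : String) : Prop :=
  ∀ line ∈ PySem.Chars.splitlines (PySem.Chars.strip block.toList),
    PySem.Chars.strip line ≠ [] →
      ((PySem.Chars.isIn ['-'] (PySem.Chars.strip line) = true →
          (PySem.Int.ofChars? (PySem.Chars.strip ((PySem.Chars.splitOnMax (PySem.Chars.strip line) ['-'] 1).getD 0 [])) ≠ none ∧
           PySem.Int.ofChars? (PySem.Chars.strip ((PySem.Chars.splitOnMax (PySem.Chars.strip line) ['-'] 1).getD 1 [])) ≠ none)) ∧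
       (PySem.Chars.isIn ['-'] (PySem.Chars.strip line) = false →
          PySem.Int.ofChars? (PySem.Chars.strip line) ≠ none))
instance (block : String) : Decidable (Pre_parse_id_block block) := by unfold Pre_parse_id_block; infer_instance

def pvWitness_parse_id_block : String := "1-3\n 7 \n\n10-8"

def Spec_parse_id_block (block : String) (out : List Int) : Prop := out = parse_id_block_alt block
instance (block : String) (out : List Int) : Decidable (Spec_parse_id_block block out) := by unfold Spec_parse_id_block; infer_instance

-- ===== CLAIM (what is proved, stated in full; the proofs are below) =====
def Claim_equal_parse_id_block : Prop := ∀ (block : String), Dom_parse_id_block block → Pre_parse_id_block block → Spec_parse_id_block block (parse_id_block block)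

-- ===== LEMMAS AND PROOFS =====

-- the interval a line contributes (none for a blank line): shared vocabulary of the proofs
def pvIv (line : List Char) : Option (Int × Int) :=
  let s := PySem.Chars.strip line
  if s = [] then none
  else if PySem.Chars.isIn ['-'] s then
    let a := (PySem.Int.ofChars? (PySem.Chars.strip ((PySem.Chars.splitOnMax s ['-'] 1).getD 0 []))).getD 0
    let b := (PySem.Int.ofChars? (PySem.Chars.strip ((PySem.Chars.splitOnMax s ['-'] 1).getD 1 []))).getD 0
    some (if a ≤ b then (a, b) else (b, a))
  else
    some ((PySem.Int.ofChars? s).getD 0, (PySem.Int.ofChars? s).getD 0)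

def pvExpand (iv : Int × Int) : List Int := PySem.List.pyRange iv.1 (iv.2 + 1) 1

def pvIvs (block : String) : List (Int × Int) :=
  (PySem.Chars.splitlines (PySem.Chars.strip block.toList)).flatMap (fun line => (pvIv line).toList)

theorem pvIv_lo_le_hi (line : List Char) (iv : Int × Int) (h : pvIv line = some iv) :
    iv.1 ≤ iv.2 := by
  simp only [pvIv] at h
  split_ifs at h with h1 h2 h3
  all_goals try cases h
  all_goals simp_all
  all_goals omega

theorem mem_pvExpand (iv : Int × Int) (x : Int) :
    x ∈ pvExpand iv ↔ iv.1 ≤ x ∧ x ≤ iv.2 := by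
  rw [pvExpand, PySem.List.mem_pyRange_one]; omega

-- A's loop builds set(union of the per-line ranges)
theorem pvA_fold (lines : List (List Char)) : ∀ (init : PySem.Set Int),
    lines.foldl (fun ids line =>
      let s := PySem.Chars.strip line
      if s = [] then ids
      else if PySem.Chars.isIn ['-'] s then
        let a := (PySem.Int.ofChars? (PySem.Chars.strip ((PySem.Chars.splitOnMax s ['-'] 1).getD 0 []))).getD 0
        let b := (PySem.Int.ofChars? (PySem.Chars.strip ((PySem.Chars.splitOnMax s ['-'] 1).getD 1 []))).getD 0
        let lo := if a ≤ b then a else b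
        let hi := if a ≤ b then b else a
        (PySem.List.pyRange lo (hi + 1) 1).foldl PySem.Set.add ids
      else
        PySem.Set.add ids ((PySem.Int.ofChars? s).getD 0)) init
    = PySem.Set.update init ((lines.flatMap (fun line => (pvIv line).toList)).flatMap pvExpand) := by
  induction lines with
  | nil => intro init; simp [PySem.Set.update_nil]
  | cons l rest ih =>
    intro init
    rw [List.foldl_cons, ih, List.flatMap_cons, List.flatMap_append, PySem.Set.update_append]
    congr 1
    simp only [pvIv]
    split_ifs with h1 h2 h3
    · simp [PySem.Set.update_nil]
    · simp only [Option.toList_some, List.flatMap_cons, List.flatMap_nil, List.append_nil, pvExpand]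
      rfl
    · simp only [Option.toList_some, List.flatMap_cons, List.flatMap_nil, List.append_nil, pvExpand]
      rfl
    · simp only [Option.toList_some, List.flatMap_cons, List.flatMap_nil, List.append_nil, pvExpand]
      rw [PySem.List.pyRange_one_singleton, PySem.Set.update_cons, PySem.Set.update_nil]

theorem parse_id_block_eq (block : String) :
    parse_id_block block =
      PySem.List.sorted (PySem.Set.ofList ((pvIvs block).flatMap pvExpand)) (fun x => x) false := by
  rw [parse_id_block]
  rw [pvA_fold, pvIvs, PySem.Set.update_empty]

-- B's collection loop builds the interval list
theorem pvB_fold (lines : List (List Char)) : ∀ (init : List (Int × Int)),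
    lines.foldl (fun acc line =>
      let s := PySem.Chars.strip line
      if s = [] then acc
      else if PySem.Chars.isIn ['-'] s then
        let a := (PySem.Int.ofChars? (PySem.Chars.strip ((PySem.Chars.splitOnMax s ['-'] 1).getD 0 []))).getD 0
        let b := (PySem.Int.ofChars? (PySem.Chars.strip ((PySem.Chars.splitOnMax s ['-'] 1).getD 1 []))).getD 0
        acc ++ [if a ≤ b then (a, b) else (b, a)]
      else
        acc ++ [((PySem.Int.ofChars? s).getD 0, (PySem.Int.ofChars? s).getD 0)]) init
    = init ++ lines.flatMap (fun line => (pvIv line).toList) := by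
  induction lines with
  | nil => intro init; simp
  | cons l rest ih =>
    intro init
    rw [List.foldl_cons, ih, List.flatMap_cons, ← List.append_assoc]
    congr 2
    simp only [pvIv]
    split_ifs with h1 h2 h3 <;> simp

-- proof-side names for B's merge loop
def pvStep (st : List Int × Option (Int × Int)) (iv : Int × Int) : List Int × Option (Int × Int) :=
  match st.2 with
  | none => (st.1, some iv)
  | some cur =>
    if iv.1 ≤ cur.2 + 1 then
      (st.1, some (if cur.2 < iv.2 then (cur.1, iv.2) else cur))
    else
      (st.1 ++ PySem.List.pyRange cur.1 (cur.2 + 1) 1, some iv)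

def pvFinish (st : List Int × Option (Int × Int)) : List Int :=
  match st.2 with
  | none => st.1
  | some cur => st.1 ++ PySem.List.pyRange cur.1 (cur.2 + 1) 1

theorem parse_id_block_alt_eq (block : String) :
    parse_id_block_alt block =
      pvFinish ((PySem.List.sorted (pvIvs block) (fun iv => iv.1) false).foldl pvStep ([], none)) := by
  rw [parse_id_block_alt]
  rw [pvB_fold, pvIvs]
  rfl

-- the merge-and-expand loop of B, on a start-sorted list of nonempty intervals:
-- it appends a strictly increasing enumeration of the union of the ranges
theorem pv_mergeRun (ivs : List (Int × Int)) :
    ∀ (cur : Int × Int) (out : List Int),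
      (∀ iv ∈ ivs, iv.1 ≤ iv.2) →
      ivs.Pairwise (fun p q => p.1 ≤ q.1) →
      (∀ iv ∈ ivs, cur.1 ≤ iv.1) →
      cur.1 ≤ cur.2 →
      ∃ R : List Int,
        pvFinish (ivs.foldl pvStep (out, some cur)) = out ++ R ∧
        R.Pairwise (· < ·) ∧
        (∀ x, x ∈ R ↔ ((cur.1 ≤ x ∧ x ≤ cur.2) ∨ ∃ iv ∈ ivs, iv.1 ≤ x ∧ x ≤ iv.2)) ∧
        (∀ x ∈ R, cur.1 ≤ x) := by
  induction ivs with
  | nil =>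
    intro cur out _ _ _ hcur
    refine ⟨PySem.List.pyRange cur.1 (cur.2 + 1) 1, rfl, PySem.List.pairwise_lt_pyRange_one _ _, ?_, ?_⟩
    · intro x
      rw [PySem.List.mem_pyRange_one]
      constructor
      · intro h; exact Or.inl ⟨h.1, by omega⟩
      · rintro (h | ⟨q, hq, _⟩)
        · omega
        · simp at hq
    · intro x hx; rw [PySem.List.mem_pyRange_one] at hx; omega
  | cons iv rest ih =>
    intro cur out hlohi hpair hlo hcur
    have hivlohi : iv.1 ≤ iv.2 := hlohi iv (by simp)
    have hcurlo : cur.1 ≤ iv.1 := hlo iv (by simp)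
    have hpairhd : ∀ q ∈ rest, iv.1 ≤ q.1 := fun q hq => List.rel_of_pairwise_cons hpair hq
    have hpairtl : rest.Pairwise (fun p q => p.1 ≤ q.1) := hpair.of_cons
    have hlohitl : ∀ q ∈ rest, q.1 ≤ q.2 := fun q hq => hlohi q (by simp [hq])
    rw [List.foldl_cons]
    by_cases hle : iv.1 ≤ cur.2 + 1
    · have hstep : pvStep (out, some cur) iv =
          (out, some (if cur.2 < iv.2 then (cur.1, iv.2) else cur)) := by
        simp [pvStep, hle]
      rw [hstep]
      by_cases hc : cur.2 < iv.2
      · rw [if_pos hc]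
        obtain ⟨R, hfin, hlt, hmem, hbd⟩ :=
          ih (cur.1, iv.2) out hlohitl hpairtl
            (fun q hq => le_trans hcurlo (hpairhd q hq)) (show cur.1 ≤ iv.2 by omega)
        refine ⟨R, hfin, hlt, ?_, hbd⟩
        intro x
        rw [hmem x]
        simp only [List.mem_cons]
        constructor
        · rintro (h | ⟨q, hq, h⟩)
          · by_cases hx : x ≤ cur.2
            · exact Or.inl ⟨h.1, hx⟩
            · exact Or.inr ⟨iv, Or.inl rfl, by omega⟩
          · exact Or.inr ⟨q, Or.inr hq, h⟩
        · rintro (h | ⟨q, hq | hq, h⟩)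
          · exact Or.inl (by omega)
          · subst hq; exact Or.inl (by omega)
          · exact Or.inr ⟨q, hq, h⟩
      · rw [if_neg hc]
        obtain ⟨R, hfin, hlt, hmem, hbd⟩ :=
          ih cur out hlohitl hpairtl
            (fun q hq => le_trans hcurlo (hpairhd q hq)) hcur
        refine ⟨R, hfin, hlt, ?_, hbd⟩
        intro x
        rw [hmem x]
        simp only [List.mem_cons]
        constructor
        · rintro (h | ⟨q, hq, h⟩)
          · exact Or.inl h
          · exact Or.inr ⟨q, Or.inr hq, h⟩
        · rintro (h | ⟨q, hq | hq, h⟩)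
          · exact Or.inl h
          · subst hq; exact Or.inl (by omega)
          · exact Or.inr ⟨q, hq, h⟩
    · have hstep : pvStep (out, some cur) iv =
          (out ++ PySem.List.pyRange cur.1 (cur.2 + 1) 1, some iv) := by
        simp [pvStep, hle]
      rw [hstep]
      obtain ⟨R, hfin, hlt, hmem, hbd⟩ :=
        ih iv (out ++ PySem.List.pyRange cur.1 (cur.2 + 1) 1) hlohitl hpairtl hpairhd hivlohi
      refine ⟨PySem.List.pyRange cur.1 (cur.2 + 1) 1 ++ R, ?_, ?_, ?_, ?_⟩
      · rw [hfin, List.append_assoc]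
      · rw [List.pairwise_append]
        refine ⟨PySem.List.pairwise_lt_pyRange_one _ _, hlt, ?_⟩
        intro x hx y hy
        rw [PySem.List.mem_pyRange_one] at hx
        have := hbd y hy
        omega
      · intro x
        rw [List.mem_append, hmem x, PySem.List.mem_pyRange_one]
        simp only [List.mem_cons]
        constructor
        · rintro (h | h | ⟨q, hq, h⟩)
          · exact Or.inl (by omega)
          · exact Or.inr ⟨iv, Or.inl rfl, h⟩
          · exact Or.inr ⟨q, Or.inr hq, h⟩
        · rintro (h | ⟨q, hq | hq, h⟩)
          · exact Or.inl (by omega)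
          · subst hq; exact Or.inr (Or.inl h)
          · exact Or.inr (Or.inr ⟨q, hq, h⟩)
      · intro x hx
        rcases List.mem_append.mp hx with h | h
        · rw [PySem.List.mem_pyRange_one] at h; omega
        · exact le_trans hcurlo (hbd x h)

-- ===== VERDICT (by name: the statement is the Claim_ definition above) =====
theorem parse_id_block_spec : Claim_equal_parse_id_block := by
  intro block _ _
  unfold Spec_parse_id_block
  rw [parse_id_block_eq, parse_id_block_alt_eq]
  have hperm : (PySem.List.sorted (pvIvs block) (fun iv => iv.1) false).Perm (pvIvs block) :=
    PySem.List.sorted_perm _ _ _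
  have hpair : (PySem.List.sorted (pvIvs block) (fun iv => iv.1) false).Pairwise
      (fun p q => p.1 ≤ q.1) := PySem.List.sorted_pairwise _ _
  have hlohi : ∀ iv ∈ PySem.List.sorted (pvIvs block) (fun iv => iv.1) false, iv.1 ≤ iv.2 := by
    intro iv hiv
    have : iv ∈ pvIvs block := hperm.mem_iff.mp hiv
    rw [pvIvs, List.mem_flatMap] at this
    obtain ⟨line, _, hmem⟩ := this
    exact pvIv_lo_le_hi line iv (by simpa using hmem)
  cases hs : PySem.List.sorted (pvIvs block) (fun iv => iv.1) false with
  | nil =>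
    have hnil : pvIvs block = [] := (hs ▸ hperm).nil_eq.symm
    rw [hnil]
    rfl
  | cons c rest =>
    rw [hs] at hperm hpair hlohi
    obtain ⟨R, hfin, hlt, hmem, _⟩ :=
      pv_mergeRun rest c []
        (fun q hq => hlohi q (by simp [hq]))
        hpair.of_cons
        (fun q hq => List.rel_of_pairwise_cons hpair hq)
        (hlohi c (by simp))
    have hstep0 : pvStep ([], none) c = ([], some c) := rfl
    rw [List.foldl_cons, hstep0, hfin, List.nil_append]
    refine PySem.List.sorted_eq_of_perm_of_pairwise_lt _ _ (fun x => x) ?_ hlt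
    refine ((List.perm_ext_iff_of_nodup ?_ (PySem.Set.nodup_ofList _)).mpr ?_)
    · exact hlt.imp (fun h => ne_of_lt h)
    · intro x
      rw [hmem x, PySem.Set.mem_ofList, List.mem_flatMap]
      constructor
      · rintro (h | ⟨q, hq, h⟩)
        · exact ⟨c, hperm.mem_iff.mp (by simp), (mem_pvExpand c x).mpr h⟩
        · exact ⟨q, hperm.mem_iff.mp (by simp [hq]), (mem_pvExpand q x).mpr h⟩
      · rintro ⟨q, hq, h⟩
        have : q ∈ c :: rest := hperm.mem_iff.mpr hq
        rw [mem_pvExpand] at h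
        rcases this with _ | _
        · exact Or.inl h
        · exact Or.inr ⟨q, by assumption, h⟩
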